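-- pv_equiv track=rewrite | github.com/ik48655/Introduction-to-programming | Drugi rok 2017/1 4.py | funky4
-- ===== SOURCE A (Python) =====
-- def funky4(lst,M,N):
--     matrix=[]
--     for r in range(M):
--         redak=[]
--         for s in range(N):
--             if len(lst)-1 < s:
--                 redak.append(0)
--             else:
--                 redak.append(lst[s])
--         matrix.append(redak)
--     return matrix
-- ===== SOURCE B (Python) =====
-- def funky4(lst, M, N):
--     n = max(0, N)
--     return [lst[:n] + [0] * (n - len(lst)) for _ in range(M)]
-- ===== Notes on version B (the rewrite author's own statement) =====
-- stated objective: simpler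
-- what changed: B forms each row as a single slice-plus-zero-padding expression (lst[:n] + [0]*(n-len(lst)) with n = max(0,N)) replicated over range(M), replacing A's nested loops with a per-element length test.
import Mathlib
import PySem

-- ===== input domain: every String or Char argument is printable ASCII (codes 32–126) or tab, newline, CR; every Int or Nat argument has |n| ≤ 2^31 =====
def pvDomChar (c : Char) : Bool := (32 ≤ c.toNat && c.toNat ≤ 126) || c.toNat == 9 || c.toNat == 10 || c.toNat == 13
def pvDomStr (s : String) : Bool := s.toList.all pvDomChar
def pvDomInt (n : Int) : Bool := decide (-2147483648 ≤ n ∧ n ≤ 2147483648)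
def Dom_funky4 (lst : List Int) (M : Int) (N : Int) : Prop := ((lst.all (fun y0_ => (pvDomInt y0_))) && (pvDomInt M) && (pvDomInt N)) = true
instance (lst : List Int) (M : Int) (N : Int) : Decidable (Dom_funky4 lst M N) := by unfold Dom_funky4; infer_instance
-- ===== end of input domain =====

-- B builds each row as one slice-plus-zero-padding expression replicated over range(M), instead of A's nested loops with a per-element length test; return values proved equal.

-- ===== PORT A =====
def funky4 (lst : List Int) (M : Int) (N : Int) : List (List Int) :=
  (PySem.List.pyRange 0 M 1).foldl (fun matrix _r =>
    matrix ++ [(PySem.List.pyRange 0 N 1).foldl (fun redak s =>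
      if (lst.length : Int) - 1 < s then redak ++ [0]
      else redak ++ [PySem.List.pyGetD lst s 0]) []]) []

-- ===== PORT B =====
def funky4_alt (lst : List Int) (M : Int) (N : Int) : List (List Int) :=
  let n : Int := max 0 N
  (PySem.List.pyRange 0 M 1).map (fun _ =>
    PySem.List.slice lst none (some n) ++ List.replicate (n - lst.length).toNat 0)

-- ===== PRECONDITION & SPEC =====
def Spec_funky4 (lst : List Int) (M : Int) (N : Int) (out : List (List Int)) : Prop := out = funky4_alt lst M N
instance (lst : List Int) (M : Int) (N : Int) (out : List (List Int)) : Decidable (Spec_funky4 lst M N out) := by unfold Spec_funky4; infer_instance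

-- ===== CLAIM (what is proved, stated in full; the proofs are below) =====
def Claim_equal_funky4 : Prop := ∀ (lst : List Int) (M : Int) (N : Int), Dom_funky4 lst M N → Spec_funky4 lst M N (funky4 lst M N)

-- ===== LEMMAS AND PROOFS =====

-- the per-index value over Nat range equals take-then-pad
lemma row_range_eq (lst : List Int) (n : Nat) :
    (List.range n).map (fun k => if lst.length ≤ k then 0 else lst.getD k 0)
      = lst.take n ++ List.replicate (n - lst.length) 0 := by
  induction n with
  | zero => simp
  | succ m ih =>
    rw [List.range_succ, List.map_append, ih, List.map_singleton]
    by_cases h : lst.length ≤ m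
    · have ht : lst.take (m + 1) = lst.take m := by
        rw [List.take_of_length_le h, List.take_of_length_le (by omega)]
      rw [ht, if_pos h, Nat.succ_sub h, List.replicate_succ']
      simp
    · push Not at h
      have : (m + 1 - lst.length) = 0 := by omega
      rw [this, if_neg (by omega), List.take_add_one, List.getElem?_eq_getElem h]
      simp [List.getD, List.getElem?_eq_getElem h, Nat.sub_eq_zero_of_le (by omega : m ≤ lst.length)]

-- A's inner loop equals B's row
lemma inner_eq_row (lst : List Int) (N : Int) :
    (PySem.List.pyRange 0 N 1).foldl (fun redak s =>
      if (lst.length : Int) - 1 < s then redak ++ [0]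
      else redak ++ [PySem.List.pyGetD lst s 0]) []
      = PySem.List.slice lst none (some (max 0 N)) ++ List.replicate ((max 0 N) - lst.length).toNat 0 := by
  have hstep : (fun (redak : List Int) (s : Int) =>
      if (lst.length : Int) - 1 < s then redak ++ [0]
      else redak ++ [PySem.List.pyGetD lst s 0])
      = fun redak s => redak ++ [if (lst.length : Int) - 1 < s then 0 else PySem.List.pyGetD lst s 0] := by
    funext redak s; split <;> rfl
  rw [hstep, PySem.List.foldl_append_singleton_eq_map, List.nil_append]
  rcases le_or_gt N 0 with hN | hN
  · rw [PySem.List.pyRange_one_eq_nil (by omega), max_eq_left hN]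
    have : ((0 : Int) - lst.length).toNat = 0 := by omega
    rw [this]
    simp [PySem.List.slice_to lst (le_refl (0:Int))]
  · rw [max_eq_right (le_of_lt hN), PySem.List.pyRange_one 0 N]
    rw [List.map_map, PySem.List.slice_to lst (le_of_lt hN)]
    have hmap : (List.range (N - 0).toNat).map
        ((fun s => if (lst.length : Int) - 1 < s then 0 else PySem.List.pyGetD lst s 0) ∘ (fun k : Nat => (0 : Int) + k))
        = (List.range N.toNat).map (fun k => if lst.length ≤ k then (0 : Int) else lst.getD k 0) := by
      have : (N - 0).toNat = N.toNat := by omega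
      rw [this]
      apply List.map_congr_left
      intro k _
      simp only [Function.comp, zero_add, PySem.List.pyGetD_natCast]
      congr 1
      simp only [eq_iff_iff]
      omega
    rw [hmap, row_range_eq]
    congr 2
    omega

-- ===== VERDICT (by name: the statement is the Claim_ definition above) =====
theorem funky4_spec : Claim_equal_funky4 := by
  intro lst M N _
  unfold Spec_funky4 funky4 funky4_alt
  rw [PySem.List.foldl_append_singleton_eq_map, List.nil_append]
  apply List.map_congr_left
  intro r _
  exact inner_eq_row lst N
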